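-- pv_equiv track=rewrite | github.com/bicycleman15/model_architecture_stuff | scripts/create_sharded_char_padded.py | pad_text
-- ===== SOURCE A (Python) =====
-- def pad_text(text):
--     parts = []
--     for c in text:
--         parts.append(c)
--         if c.isascii() and c.isalpha():
--             n = (ord(c.lower()) - ord('a') + 1) % 15
--             parts.append('\x00' * n)
--     return ''.join(parts)
-- ===== SOURCE B (Python) =====
-- import string
--
--
-- def pad_text(text):
--     # Staged passes: one whole-string replace per ASCII letter. Each pass inserts
--     # only NUL bytes, which no later pass matches, so the passes are independent.
--     for c in string.ascii_letters:
--         n = (ord(c.lower()) - ord("a") + 1) % 15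
--         text = text.replace(c, c + "\x00" * n)
--     return text
-- ===== Notes on version B (the rewrite author's own statement) =====
-- stated objective: alternative
-- what changed: Replaces A's single per-character loop with branch and list-append by 52 staged whole-string str.replace passes, one per ASCII letter; correct because each pass inserts only NUL bytes, which no later pass matches.
import Mathlib
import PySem

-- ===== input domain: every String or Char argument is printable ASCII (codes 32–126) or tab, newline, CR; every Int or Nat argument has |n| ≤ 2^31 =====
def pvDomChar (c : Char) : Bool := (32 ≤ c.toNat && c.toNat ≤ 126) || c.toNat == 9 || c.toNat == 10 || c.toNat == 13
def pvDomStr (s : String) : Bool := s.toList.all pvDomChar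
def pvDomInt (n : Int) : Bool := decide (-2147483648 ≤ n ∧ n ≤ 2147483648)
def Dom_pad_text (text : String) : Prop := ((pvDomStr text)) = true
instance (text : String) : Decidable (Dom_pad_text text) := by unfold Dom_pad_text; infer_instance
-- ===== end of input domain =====

-- B replaces A's single per-character loop-and-branch by 52 staged whole-string
-- replace passes, one per ASCII letter (alternative decomposition; no speed claim).

-- ===== PORT A =====
-- per-char loop: append c, and after an ASCII letter append '\x00' * ((ord(c.lower()) - ord('a') + 1) % 15)
def pad_text (text : String) : String :=
  String.mk (PySem.Chars.join []
    (text.toList.foldl (fun parts c =>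
      let parts := parts ++ [[c]]
      if decide (c.toNat < 128) && PySem.Chars.strIsalpha [c] then
        parts ++ [PySem.List.pyRepeat [Char.ofNat 0]
          (PySem.Int.mod (((((PySem.Chars.lower [c]).headD c).toNat : Int)) - (('a').toNat : Int) + 1) 15)]
      else parts) []))

-- ===== PORT B =====
-- string.ascii_letters
def pvLetters : List Char :=
  "abcdefghijklmnopqrstuvwxyzABCDEFGHIJKLMNOPQRSTUVWXYZ".toList

-- the replacement string for one pass: c + '\x00' * ((ord(c.lower()) - ord('a') + 1) % 15)
def pvPad (c : Char) : List Char :=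
  c :: List.replicate
    ((PySem.Int.mod (((((PySem.Chars.lower [c]).headD c).toNat : Int)) - (('a').toNat : Int) + 1) 15).toNat)
    (Char.ofNat 0)

-- 52 staged passes: for c in string.ascii_letters: text = text.replace(c, c + '\x00' * n)
def pad_text_alt (text : String) : String :=
  String.mk (pvLetters.foldl (fun s c => PySem.Chars.replace s [c] (pvPad c)) text.toList)

-- ===== PRECONDITION & SPEC =====
def Spec_pad_text (text : String) (out : String) : Prop := out = pad_text_alt text
instance (text : String) (out : String) : Decidable (Spec_pad_text text out) := by unfold Spec_pad_text; infer_instance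

-- ===== CLAIM (what is proved, stated in full; the proofs are below) =====
def Claim_equal_pad_text : Prop := ∀ (text : String), Dom_pad_text text → Spec_pad_text text (pad_text text)

-- ===== LEMMAS AND PROOFS =====

-- A's per-character contribution: the two (or one) list entries the loop appends for c
def pvPartsA (c : Char) : List (List Char) :=
  [c] :: (if decide (c.toNat < 128) && PySem.Chars.strIsalpha [c] then
    [PySem.List.pyRepeat [Char.ofNat 0]
      (PySem.Int.mod (((((PySem.Chars.lower [c]).headD c).toNat : Int)) - (('a').toNat : Int) + 1) 15)]
  else [])

-- A's per-character contribution, flattened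
def pvPieceA (c : Char) : List Char :=
  c :: (if decide (c.toNat < 128) && PySem.Chars.strIsalpha [c] then
    PySem.List.pyRepeat [Char.ofNat 0]
      (PySem.Int.mod (((((PySem.Chars.lower [c]).headD c).toNat : Int)) - (('a').toNat : Int) + 1) 15)
  else [])

theorem pv_join_nil_flatten (ll : List (List Char)) :
    PySem.Chars.join [] ll = ll.flatten := by
  induction ll with
  | nil => rfl
  | cons a t ih =>
    cases t with
    | nil => simp [PySem.Chars.join_singleton]
    | cons b t' => simpa [PySem.Chars.join_cons_cons] using ih

theorem pv_loopA (cs : List Char) (acc : List (List Char)) :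
    cs.foldl (fun parts c =>
      let parts := parts ++ [[c]]
      if decide (c.toNat < 128) && PySem.Chars.strIsalpha [c] then
        parts ++ [PySem.List.pyRepeat [Char.ofNat 0]
          (PySem.Int.mod (((((PySem.Chars.lower [c]).headD c).toNat : Int)) - (('a').toNat : Int) + 1) 15)]
      else parts) acc
    = acc ++ cs.flatMap pvPartsA := by
  induction cs generalizing acc with
  | nil => simp
  | cons c t ih =>
    simp only [List.foldl_cons, ih, List.flatMap_cons]
    by_cases h : (decide (c.toNat < 128) && PySem.Chars.strIsalpha [c]) = true
    · simp [h, pvPartsA, List.append_assoc]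
    · simp [h, pvPartsA, List.append_assoc]

theorem pv_flatten_partsA (cs : List Char) :
    (cs.flatMap pvPartsA).flatten = cs.flatMap pvPieceA := by
  induction cs with
  | nil => rfl
  | cons c t ih =>
    have hc : (pvPartsA c).flatten = pvPieceA c := by
      by_cases h : (decide (c.toNat < 128) && PySem.Chars.strIsalpha [c]) = true
      · simp [pvPartsA, pvPieceA, h]
      · simp [pvPartsA, pvPieceA, h]
    simp [List.flatMap_cons, List.flatten_append, hc, ih]

-- one replace pass, seen per character
def pvRepl (c x : Char) : List Char := if x = c then pvPad c else [x]

-- the composite per-character effect of running the passes for the letters in L, in order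
def pvH : List Char → Char → List Char
  | [], x => [x]
  | c :: L, x => (pvRepl c x).flatMap (pvH L)

-- str.replace with a single-character pattern is the per-character substitution
theorem pv_go_single (c : Char) (new : List Char) :
    ∀ (l : List Char) (fuel : Nat) (acc : List Char), l.length ≤ fuel →
      PySem.Chars.replace.go [c] new fuel l acc
        = acc.reverse ++ l.flatMap (fun x => if x = c then new else [x]) := by
  intro l
  induction l with
  | nil =>
    intro fuel acc _
    cases fuel <;> simp [PySem.Chars.replace.go]
  | cons x t ih =>
    intro fuel acc hle
    cases fuel with
    | zero => simp at hle
    | succ f =>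
      have ht : t.length ≤ f := by simpa using hle
      simp only [PySem.Chars.replace.go]
      by_cases hx : x = c
      · subst hx
        simp [List.isPrefixOf, ih f (new.reverse ++ acc) ht]
      · simp [List.isPrefixOf, hx, ih f (x :: acc) ht, Ne.symm hx]

theorem pv_replace_single (c : Char) (new : List Char) (s : List Char) :
    PySem.Chars.replace s [c] new = s.flatMap (fun x => if x = c then new else [x]) := by
  simp [PySem.Chars.replace, pv_go_single c new s s.length [] (le_refl _)]

-- the staged passes compose into one flatMap of the composite substitution
theorem pv_foldl_replace (L : List Char) :
    ∀ s : List Char,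
      L.foldl (fun s c => PySem.Chars.replace s [c] (pvPad c)) s = s.flatMap (pvH L) := by
  induction L with
  | nil => intro s; simp [pvH]
  | cons c L ih =>
    intro s
    rw [List.foldl_cons, ih, pv_replace_single, List.flatMap_assoc]
    simp only [pvH, pvRepl]

-- the composite substitution agrees with A's per-character piece, checked for all 128 ASCII codes
set_option maxRecDepth 2000000 in
theorem pv_h_eq_piece (c : Char) (hc : pvDomChar c = true) :
    pvH pvLetters c = pvPieceA c := by
  have h128 : c.toNat < 128 := by
    simp only [pvDomChar, Bool.or_eq_true, Bool.and_eq_true, decide_eq_true_eq, beq_iff_eq] at hc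
    omega
  have hall : ∀ n ∈ List.range 128,
      pvH pvLetters (Char.ofNat n) = pvPieceA (Char.ofNat n) := by decide
  have := hall c.toNat (List.mem_range.mpr h128)
  rwa [Char.ofNat_toNat] at this

-- ===== VERDICT (by name: the statement is the Claim_ definition above) =====
set_option maxRecDepth 2000000 in
theorem pad_text_spec : Claim_equal_pad_text := by
  intro text hdom
  unfold Spec_pad_text pad_text pad_text_alt
  rw [pv_loopA, List.nil_append, pv_join_nil_flatten, pv_flatten_partsA, pv_foldl_replace]
  have hall : ∀ c ∈ text.toList, pvDomChar c = true := by
    simpa [Dom_pad_text, pvDomStr, List.all_eq_true] using hdom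
  congr 1
  exact (List.flatMap_congr (fun c hc => pv_h_eq_piece c (hall c hc))).symm
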